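-- pv_equiv track=rewrite | github.com/2hemi/Fibonacci-clock-pygame-python | fiboClock.py | splittime
-- ===== SOURCE A (Python) =====
-- def splittime(hour):
--
-- 	liste = []
--
-- 	while True:
--
-- 		if hour >= 5:
-- 			hour -=5
-- 			liste.append(5)
--
-- 		if hour >= 3 and hour < 5:
-- 			hour -=3
-- 			liste.append(3)
--
-- 		if hour == 2:
-- 			hour -=2
-- 			liste.append(2)
--
-- 		if hour == 1:
-- 			hour -=1
-- 			liste.append(1)
--
-- 		if hour == 0:
-- 			break
--
-- 	return liste
-- ===== SOURCE B (Python) =====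
-- def splittime(hour):
--     rems = {0: [], 1: [1], 2: [2], 3: [3], 4: [3, 1]}
--     return [5] * (hour // 5) + rems[hour % 5]
-- ===== Notes on version B (the rewrite author's own statement) =====
-- stated objective: faster
-- what changed: Replaced the subtract-5-per-iteration while loop with a closed form: hour//5 copies of 5 plus a remainder lookup table for hour%5.
import Mathlib
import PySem

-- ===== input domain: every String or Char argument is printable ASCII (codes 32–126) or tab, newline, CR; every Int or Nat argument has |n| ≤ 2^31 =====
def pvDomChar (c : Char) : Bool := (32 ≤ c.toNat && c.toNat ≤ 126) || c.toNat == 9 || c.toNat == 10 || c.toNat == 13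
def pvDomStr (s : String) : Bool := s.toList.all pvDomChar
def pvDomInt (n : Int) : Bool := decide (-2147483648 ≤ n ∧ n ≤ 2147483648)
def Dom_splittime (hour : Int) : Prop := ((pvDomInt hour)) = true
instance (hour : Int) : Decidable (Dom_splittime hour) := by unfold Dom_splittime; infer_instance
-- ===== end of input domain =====

-- B replaces A's subtract-5-per-iteration while loop by a closed form (hour//5 fives plus a remainder table), a faster computation of the same list.

-- ===== PORT A =====
-- fuel makes the 'while True' total; on Pre_ (0 ≤ hour) the loop breaks well within hour.toNat + 1 iterations
def splittimeLoop (fuel : Nat) (hour : Int) (liste : List Int) : List Int :=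
  match fuel with
  | 0 => liste
  | fuel + 1 =>
    let p1 := if hour ≥ 5 then (hour - 5, liste ++ [5]) else (hour, liste)
    let p2 := if p1.1 ≥ 3 ∧ p1.1 < 5 then (p1.1 - 3, p1.2 ++ [3]) else p1
    let p3 := if p2.1 = 2 then (p2.1 - 2, p2.2 ++ [2]) else p2
    let p4 := if p3.1 = 1 then (p3.1 - 1, p3.2 ++ [1]) else p3
    if p4.1 = 0 then p4.2 else splittimeLoop fuel p4.1 p4.2

def splittime (hour : Int) : List Int := splittimeLoop (hour.toNat + 1) hour []

-- ===== PORT B =====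
-- Source B's dict rems, as a lookup function; exact because the key hour % 5 always lies in {0,1,2,3,4}
def splittimeRems (r : Int) : List Int :=
  if r = 1 then [1] else if r = 2 then [2] else if r = 3 then [3] else if r = 4 then [3, 1] else []

def splittime_alt (hour : Int) : List Int :=
  List.replicate (PySem.Int.floordiv hour 5).toNat 5 ++ splittimeRems (PySem.Int.mod hour 5)

-- ===== PRECONDITION & SPEC =====
-- A's 'while True' never breaks for hour < 0 (Python diverges there), so Pre_ excludes exactly the negatives.
def Pre_splittime (hour : Int) : Prop := 0 ≤ hour
instance (hour : Int) : Decidable (Pre_splittime hour) := by unfold Pre_splittime; infer_instance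
def pvWitness_splittime : Int := (9)

def Spec_splittime (hour : Int) (out : List Int) : Prop := out = splittime_alt hour
instance (hour : Int) (out : List Int) : Decidable (Spec_splittime hour out) := by unfold Spec_splittime; infer_instance

-- ===== CLAIM =====
def Claim_equal_splittime : Prop := ∀ (hour : Int), Dom_splittime hour → Pre_splittime hour → Spec_splittime hour (splittime hour)

-- ===== LEMMAS AND PROOFS =====

-- for 10 ≤ h, one iteration of A's loop appends a single 5 and recurses with h - 5
theorem loop_step (f : Nat) (h : Int) (acc : List Int) (h10 : 10 ≤ h) :
    splittimeLoop (f + 1) h acc = splittimeLoop f (h - 5) (acc ++ [5]) := by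
  simp only [splittimeLoop]
  rw [if_pos (show h ≥ 5 by omega)]
  rw [if_neg (show ¬((h - 5, acc ++ [5]).1 ≥ 3 ∧ (h - 5, acc ++ [5]).1 < 5) by simp; omega)]
  rw [if_neg (show ¬((h - 5, acc ++ [5]).1 = 2) by simp; omega)]
  rw [if_neg (show ¬((h - 5, acc ++ [5]).1 = 1) by simp; omega)]
  rw [if_neg (show ¬((h - 5, acc ++ [5]).1 = 0) by simp; omega)]

-- B's closed form peels off one 5 for 5 ≤ h
theorem alt_step (h : Int) (h5 : 5 ≤ h) : splittime_alt h = 5 :: splittime_alt (h - 5) := by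
  have e1 : PySem.Int.floordiv h 5 = h / 5 := PySem.Int.floordiv_eq_ediv_of_pos (by omega)
  have e2 : PySem.Int.floordiv (h - 5) 5 = (h - 5) / 5 := PySem.Int.floordiv_eq_ediv_of_pos (by omega)
  have e3 : PySem.Int.mod h 5 = h % 5 := PySem.Int.mod_eq_emod_of_pos (by omega)
  have e4 : PySem.Int.mod (h - 5) 5 = (h - 5) % 5 := PySem.Int.mod_eq_emod_of_pos (by omega)
  have hm : h % 5 = (h - 5) % 5 := by omega
  have ht : (h / 5).toNat = ((h - 5) / 5).toNat + 1 := by omega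
  unfold splittime_alt
  rw [e1, e2, e3, e4, hm, ht, List.replicate_succ]
  rfl

-- loop invariant: with enough fuel, A's loop appends exactly B's closed form to the accumulator
theorem loop_eq (fuel : Nat) : ∀ (h : Int) (acc : List Int), 0 ≤ h → h < 5 * fuel →
    splittimeLoop fuel h acc = acc ++ splittime_alt h := by
  induction fuel with
  | zero => intro h acc h0 hf; omega
  | succ f ih =>
    intro h acc h0 hf
    by_cases hbig : 10 ≤ h
    · rw [loop_step f h acc hbig, ih (h - 5) (acc ++ [5]) (by omega) (by omega),
        alt_step h (by omega)]
      simp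
    · interval_cases h <;>
        simp [splittimeLoop, splittime_alt, splittimeRems, PySem.Int.floordiv, PySem.Int.mod,
          Int.fdiv, Int.fmod]

-- ===== VERDICT =====
theorem splittime_spec : Claim_equal_splittime := by
  intro hour _ hpre
  unfold Spec_splittime splittime
  rw [loop_eq (hour.toNat + 1) hour [] hpre (by omega)]
  simp
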